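-- pv_equiv track=rewrite | github.com/LukeCampbell3/Mixture-of-Agents | scripts/export_openmythos_ce.py | task_id
-- ===== SOURCE A (Python) =====
-- def task_id(pair: dict[str, str]) -> str:
--     index = pair.get("_index", 0)
--     slug = "".join(
--         char if char.isalnum() else "_"
--         for char in pair["prompt"].lower().strip()[:48]
--     ).strip("_")
--     while "__" in slug:
--         slug = slug.replace("__", "_")
--     return f"teacher_{index:03d}_{slug or 'task'}"
-- ===== SOURCE B (Python) =====
-- def task_id(pair: dict[str, str]) -> str:
--     # Single left-to-right pass: collect maximal alphanumeric runs, join with '_'.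
--     words = []
--     cur = ""
--     for ch in pair["prompt"].lower().strip()[:48]:
--         if ch.isalnum():
--             cur += ch
--         else:
--             if cur:
--                 words.append(cur)
--             cur = ""
--     if cur:
--         words.append(cur)
--     slug = "_".join(words)
--     return f"teacher_{pair.get('_index', 0):03d}_{slug or 'task'}"
-- ===== Notes on version B (the rewrite author's own statement) =====
-- stated objective: simpler
-- what changed: Replaces A's build-then-fix pipeline (map every char to itself-or-'_', strip '_' from both ends, then repeatedly replace '__' until none remain) by one left-to-right pass that collects maximal alphanumeric runs and joins them with single '_'.
import Mathlib
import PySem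

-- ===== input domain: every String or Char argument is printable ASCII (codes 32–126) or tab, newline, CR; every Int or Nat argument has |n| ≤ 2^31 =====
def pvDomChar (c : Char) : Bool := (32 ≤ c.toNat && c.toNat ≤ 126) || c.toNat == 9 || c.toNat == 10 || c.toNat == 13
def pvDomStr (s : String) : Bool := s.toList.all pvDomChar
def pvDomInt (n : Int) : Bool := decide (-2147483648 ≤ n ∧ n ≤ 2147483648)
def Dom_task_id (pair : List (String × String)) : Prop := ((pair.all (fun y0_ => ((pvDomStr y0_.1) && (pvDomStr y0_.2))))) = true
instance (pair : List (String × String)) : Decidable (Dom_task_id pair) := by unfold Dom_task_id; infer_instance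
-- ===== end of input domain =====

-- B replaces A's map/strip/collapse pipeline by a single pass collecting maximal alphanumeric runs; return values proved equal on Pre_ (key "prompt" present, no "_index" key).

-- ===== PORT A =====
-- A's `while "__" in slug: slug = slug.replace("__", "_")` loop, made total with fuel;
-- each replace strictly shortens the list, so fuel = slug.length always suffices (proved below).
def collapseA : Nat → List Char → List Char
  | 0, slug => slug
  | fuel+1, slug =>
    if PySem.Chars.isIn ['_', '_'] slug then
      collapseA fuel (PySem.Chars.replace slug ['_', '_'] ['_'])
    else slug

def task_id (pair : List (String × String)) : String :=
  -- pair.get("_index", 0): Pre_ excludes the key "_index" (a present str value makes Python's ":03d" raise ValueError), so the default 0 is taken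
  let index : Int := 0
  -- pair["prompt"]: Pre_ requires the key to be present (else Python raises KeyError)
  let prompt := PySem.Dict.getD ⟨pair⟩ "prompt" ""
  let mapped := PySem.Chars.join []
    ((PySem.List.slice (PySem.Chars.strip (PySem.Chars.lower prompt.toList)) none (some 48)).map
      (fun c => if PySem.Chars.isalnum c then [c] else ['_']))
  let slug0 := PySem.Chars.stripChars mapped ['_']
  let slug := collapseA slug0.length slug0
  String.ofList ("teacher_".toList ++ (PySem.Chars.zfill (PySem.Int.toStr index).toList 3)
    ++ '_' :: (if slug = [] then "task".toList else slug))

-- ===== PORT B =====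
def task_id_alt (pair : List (String × String)) : String :=
  -- pair["prompt"]: Pre_ requires the key; pair.get("_index", 0) is 0 under Pre_ (no "_index" key)
  let prompt := PySem.Dict.getD ⟨pair⟩ "prompt" ""
  let st := (PySem.List.slice (PySem.Chars.strip (PySem.Chars.lower prompt.toList)) none (some 48)).foldl
      (fun (acc : List (List Char) × List Char) ch =>
        if PySem.Chars.isalnum ch then (acc.1, acc.2 ++ [ch])
        else (if acc.2 ≠ [] then acc.1 ++ [acc.2] else acc.1, []))
      ([], [])
  let words := if st.2 ≠ [] then st.1 ++ [st.2] else st.1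
  let slug := PySem.Chars.join ['_'] words
  String.ofList ("teacher_".toList ++ (PySem.Chars.zfill (PySem.Int.toStr 0).toList 3)
    ++ '_' :: (if slug = [] then "task".toList else slug))

-- ===== PRECONDITION & SPEC =====
-- Pre_ excludes exactly the inputs on which A raises: a missing "prompt" key (KeyError) and a
-- present "_index" key (its str value makes f"{index:03d}" raise ValueError).
def Pre_task_id (pair : List (String × String)) : Prop :=
  PySem.Dict.contains (⟨pair⟩ : PySem.Dict String String) "prompt" = true ∧ PySem.Dict.contains (⟨pair⟩ : PySem.Dict String String) "_index" = false
instance (pair : List (String × String)) : Decidable (Pre_task_id pair) := by unfold Pre_task_id; infer_instance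
def pvWitness_task_id : (List (String × String)) := [("prompt", "  Hello, World!! foo__bar  ")]

def Spec_task_id (pair : List (String × String)) (out : String) : Prop := out = task_id_alt pair
instance (pair : List (String × String)) (out : String) : Decidable (Spec_task_id pair out) := by unfold Spec_task_id; infer_instance

-- ===== CLAIM (what is proved, stated in full; the proofs are below) =====
def Claim_equal_task_id : Prop := ∀ (pair : List (String × String)), Dom_task_id pair → Pre_task_id pair → Spec_task_id pair (task_id pair)

-- ===== LEMMAS AND PROOFS =====

-- A's per-char replacement c if c.isalnum() else "_"
def fA (c : Char) : Char := if PySem.Chars.isalnum c then c else '_'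
def naB (c : Char) : Bool := !PySem.Chars.isalnum c

-- collapse each maximal run of '_' to a single '_'
def squeeze : List Char → List Char
  | [] => []
  | [a] => [a]
  | a :: b :: t => if a = '_' ∧ b = '_' then squeeze (b :: t) else a :: squeeze (b :: t)

-- one pass of slug.replace("__", "_")
def rep : List Char → List Char
  | [] => []
  | [a] => [a]
  | a :: b :: t => if a = '_' ∧ b = '_' then '_' :: rep t else a :: rep (b :: t)

-- "__" in slug
def hasDD : List Char → Bool
  | a :: b :: t => (a == '_' && b == '_') || hasDD (b :: t)
  | _ => false

-- maximal alphanumeric runs, in order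
def runs : List Char → List (List Char)
  | [] => []
  | [c] => if PySem.Chars.isalnum c then [[c]] else []
  | c :: d :: t =>
    if PySem.Chars.isalnum c then
      if PySem.Chars.isalnum d then
        match runs (d :: t) with
        | [] => [[c]]
        | r :: rest => (c :: r) :: rest
      else [c] :: runs (d :: t)
    else runs (d :: t)

-- B's fold state, as a recursion with the pending run as parameter
def runsP (cur : List Char) : List Char → List (List Char)
  | [] => if cur = [] then [] else [cur]
  | c :: t =>
    if PySem.Chars.isalnum c then runsP (cur ++ [c]) t
    else if cur = [] then runsP [] t else cur :: runsP [] t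
theorem replace_go_eq : ∀ (fuel : Nat) (l acc : List Char), l.length ≤ fuel →
    PySem.Chars.replace.go ['_','_'] ['_'] fuel l acc = acc.reverse ++ rep l := by
  intro fuel
  induction fuel with
  | zero =>
    intro l acc h
    have : l = [] := List.eq_nil_of_length_eq_zero (Nat.le_zero.mp h)
    subst this
    simp [PySem.Chars.replace.go, rep]
  | succ n ih =>
    intro l acc h
    match l with
    | [] => simp [PySem.Chars.replace.go, rep]
    | [c] =>
      simp only [PySem.Chars.replace.go]
      have hpre : List.isPrefixOf ['_','_'] [c] = false := by simp [List.isPrefixOf]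
      rw [hpre]
      simp only [Bool.false_eq_true, if_false]
      rw [ih [] (c :: acc) (by simp)]
      simp [rep]
    | c :: b :: t =>
      simp only [PySem.Chars.replace.go]
      by_cases hc : c = '_' ∧ b = '_'
      · obtain ⟨hc1, hc2⟩ := hc; subst hc1; subst hc2
        have hpre : List.isPrefixOf ['_','_'] ('_' :: '_' :: t) = true := by
          simp [List.isPrefixOf]
        rw [hpre]
        simp only [if_true]
        rw [ih _ _ (by simp at h ⊢; omega)]
        simp [rep]
      · have hpre : List.isPrefixOf ['_','_'] (c :: b :: t) = false := by
          simp [List.isPrefixOf]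
          intro h1 h2
          exact hc ⟨h1.symm, h2.symm⟩
        rw [hpre]
        simp only [Bool.false_eq_true, if_false]
        rw [ih _ _ (by simp at h ⊢; omega)]
        simp [rep, hc]
theorem replace_eq_rep (u : List Char) : PySem.Chars.replace u ['_','_'] ['_'] = rep u := by
  have := replace_go_eq u.length u [] le_rfl
  simpa [PySem.Chars.replace] using this

theorem head?_rep (u : List Char) : (rep u).head? = u.head? := by
  induction u using rep.induct with
  | case1 => rfl
  | case2 a => rfl
  | case3 a b t h ih => simp [rep, h]
  | case4 a b t h ih => simp [rep, h]

theorem squeeze_cons_cons (a b : Char) (t : List Char) :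
    squeeze (a :: b :: t) = if a = '_' ∧ b = '_' then squeeze (b :: t) else a :: squeeze (b :: t) := rfl

theorem squeeze_cons_head (a : Char) (v : List Char) :
    squeeze (a :: v) = if a = '_' ∧ v.head? = some '_' then squeeze v else a :: squeeze v := by
  cases v with
  | nil => simp [squeeze]
  | cons b t =>
    rw [squeeze_cons_cons]
    by_cases h : a = '_' ∧ b = '_'
    · rw [if_pos h, if_pos (by simp [h.1, h.2])]
    · rw [if_neg h, if_neg (by simpa using h)]

theorem squeeze_rep (u : List Char) : squeeze (rep u) = squeeze u := by
  induction u using rep.induct with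
  | case1 => rfl
  | case2 a => rfl
  | case3 a b t h ih =>
    obtain ⟨h1, h2⟩ := h; subst h1; subst h2
    rw [rep, if_pos ⟨rfl, rfl⟩]
    rw [squeeze_cons_cons, if_pos ⟨rfl, rfl⟩]
    rw [squeeze_cons_head '_' (rep t), head?_rep, ih, squeeze_cons_head '_' t]
  | case4 a b t h ih =>
    rw [rep, if_neg h]
    rw [squeeze_cons_head a (rep (b :: t)), head?_rep, ih]
    rw [squeeze_cons_head a (b :: t)]

theorem rep_length_lt (u : List Char) (h : hasDD u = true) : (rep u).length < u.length := by
  induction u using rep.induct with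
  | case1 => simp [hasDD] at h
  | case2 a => simp [hasDD] at h
  | case3 a b t hab ih =>
    obtain ⟨h1, h2⟩ := hab; subst h1; subst h2
    rw [rep, if_pos ⟨rfl, rfl⟩]
    have : (rep t).length ≤ t.length := by
      clear h ih
      induction t using rep.induct with
      | case1 => simp [rep]
      | case2 a => simp [rep]
      | case3 a b t hab ih => rw [rep, if_pos hab]; simp; omega
      | case4 a b t hab ih => rw [rep, if_neg hab]; simpa using ih
    simp; omega
  | case4 a b t hab ih =>
    rw [rep, if_neg hab]
    have hd : hasDD (b :: t) = true := by
      rw [hasDD] at h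
      rcases Bool.or_eq_true_iff.mp h with h' | h'
      · exfalso; apply hab; constructor <;> [skip; skip] <;>
          simp at h' <;> tauto
      · exact h'
    have := ih hd
    simpa using this
theorem squeeze_of_not_hasDD (u : List Char) (h : hasDD u = false) : squeeze u = u := by
  induction u using squeeze.induct with
  | case1 => rfl
  | case2 a => rfl
  | case3 a b t hab ih =>
    exfalso
    rw [hasDD] at h
    simp [hab.1, hab.2] at h
  | case4 a b t hab ih =>
    rw [squeeze_cons_cons, if_neg hab]
    rw [hasDD] at h
    simp only [Bool.or_eq_false_iff] at h
    rw [ih h.2]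

theorem infix_dd_iff (u : List Char) : (['_','_'] <:+: u) ↔ hasDD u = true := by
  induction u with
  | nil => simp [hasDD]
  | cons a t ih =>
    rw [List.infix_cons_iff, ih]
    cases t with
    | nil =>
      simp [hasDD, List.cons_prefix_cons]
    | cons b t' =>
      rw [hasDD]
      constructor
      · rintro (hp | hd)
        · rw [List.cons_prefix_cons] at hp
          obtain ⟨ha, hp⟩ := hp
          rw [List.cons_prefix_cons] at hp
          simp [ha.symm, hp.1.symm]
        · simp [hd]
      · intro h
        rcases Bool.or_eq_true_iff.mp h with h' | h'
        · left
          simp only [Bool.and_eq_true, beq_iff_eq] at h'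
          rw [h'.1, h'.2]
          simp [List.cons_prefix_cons]
        · right; exact h'

theorem isIn_eq_hasDD (u : List Char) : PySem.Chars.isIn ['_','_'] u = hasDD u := by
  cases h : hasDD u with
  | true => rw [(PySem.Chars.isIn_iff_infix _ _).mpr (by rw [infix_dd_iff, h])]
  | false =>
    rw [(PySem.Chars.isIn_eq_false_iff _ _).mpr]
    rw [infix_dd_iff, h]
    simp

theorem collapseA_eq_squeeze : ∀ (fuel : Nat) (u : List Char), u.length ≤ fuel →
    collapseA fuel u = squeeze u := by
  intro fuel
  induction fuel with
  | zero =>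
    intro u h
    have : u = [] := List.eq_nil_of_length_eq_zero (Nat.le_zero.mp h)
    subst this; rfl
  | succ n ih =>
    intro u h
    rw [collapseA, isIn_eq_hasDD]
    cases hdd : hasDD u with
    | false => simp [squeeze_of_not_hasDD u hdd]
    | true =>
      rw [if_pos rfl, replace_eq_rep, ih _ (by have := rep_length_lt u hdd; omega)]
      exact squeeze_rep u
theorem runs_cons_nonalnum (c : Char) (t : List Char) (h : PySem.Chars.isalnum c = false) :
    runs (c :: t) = runs t := by
  cases t with
  | nil => simp [runs, h]
  | cons d t' => rw [runs, if_neg (by simp [h])]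

theorem runs_cons_alnum_ne_nil (c : Char) (t : List Char) (h : PySem.Chars.isalnum c = true) :
    runs (c :: t) ≠ [] := by
  cases t with
  | nil => simp [runs, h]
  | cons d t' =>
    rw [runs, if_pos h]
    by_cases hd : PySem.Chars.isalnum d = true
    · rw [if_pos hd]
      cases runs (d :: t') <;> simp
    · rw [if_neg hd]; simp

theorem runs_all_alnum (u : List Char) (hne : u ≠ []) (h : ∀ c ∈ u, PySem.Chars.isalnum c = true) :
    runs u = [u] := by
  induction u with
  | nil => exact absurd rfl hne
  | cons a t ih =>
    cases t with
    | nil => simp [runs, h a (by simp)]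
    | cons b t' =>
      rw [runs, if_pos (h a (by simp)), if_pos (h b (by simp)),
        ih (by simp) (fun c hc => h c (by simp [hc]))]

theorem runs_append_alnum_run (r t : List Char) (hne : r ≠ [])
    (hall : ∀ c ∈ r, PySem.Chars.isalnum c = true)
    (ht : t = [] ∨ ∀ a ∈ t.head?, PySem.Chars.isalnum a = false) :
    runs (r ++ t) = r :: runs t := by
  induction r with
  | nil => exact absurd rfl hne
  | cons a r' ih =>
    cases r' with
    | nil =>
      rcases ht with ht | ht
      · subst ht; simp [runs, hall a (by simp)]
      · cases t with
        | nil => simp [runs, hall a (by simp)]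
        | cons e t' =>
          simp only [List.singleton_append]
          rw [runs, if_pos (hall a (by simp)), if_neg (by simpa using ht e rfl)]
    | cons b r'' =>
      have hrec := ih (by simp) (fun c hc => hall c (by simp [hc]))
      simp only [List.cons_append] at hrec ⊢
      rw [runs, if_pos (hall a (by simp)), if_pos (hall b (by simp)), hrec]

theorem runs_nonalnum_prefix (d w : List Char) (h : ∀ c ∈ d, PySem.Chars.isalnum c = false) :
    runs (d ++ w) = runs w := by
  induction d with
  | nil => rfl
  | cons e d' ih =>
    simp only [List.cons_append]
    rw [runs_cons_nonalnum _ _ (h e (by simp)), ih (fun c hc => h c (by simp [hc]))]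

theorem runs_dropWhile (s : List Char) : runs (s.dropWhile naB) = runs s := by
  conv_rhs => rw [← List.takeWhile_append_dropWhile (p := naB) (l := s)]
  rw [runs_nonalnum_prefix]
  intro c hc
  have := List.mem_takeWhile_imp hc
  simpa [naB] using this

theorem runs_append_nonalnum (x d : List Char) (h : ∀ c ∈ d, PySem.Chars.isalnum c = false) :
    runs (x ++ d) = runs x := by
  induction x using runs.induct with
  | case1 =>
    simpa using runs_nonalnum_prefix d [] h
  | case2 c hc =>
    rw [List.singleton_append,
      show c :: d = [c] ++ d by rfl,
      runs_append_alnum_run [c] d (by simp) (by simpa using hc)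
        (by cases d with
          | nil => exact Or.inl rfl
          | cons e d' => exact Or.inr (by intro a ha; simp at ha; subst ha; exact h e (by simp))),
      show runs d = runs (d ++ []) by simp,
      runs_nonalnum_prefix d [] h]
    simp [runs, hc]
  | case3 c hc =>
    rw [List.singleton_append, runs_cons_nonalnum c d (by simpa using hc),
      show runs d = runs (d ++ []) by simp,
      runs_nonalnum_prefix d [] h]
    simp [runs, hc]
  | case4 c e t hc he hnil ih =>
    exact absurd hnil (runs_cons_alnum_ne_nil e t he)
  | case5 c e t hc he r rest hr ih =>
    simp only [List.cons_append] at ih ⊢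
    have hne := runs_cons_alnum_ne_nil e t he
    rw [runs, if_pos hc, if_pos he, ih, runs, if_pos hc, if_pos he]
  | case6 c e t hc he ih =>
    simp only [List.cons_append] at ih ⊢
    rw [runs, if_pos hc, if_neg he, ih, runs, if_pos hc, if_neg he]
  | case7 c e t hc ih =>
    simp only [List.cons_append] at ih ⊢
    rw [runs_cons_nonalnum c (e :: (t ++ d)) (by simpa using hc), ih,
      runs_cons_nonalnum c (e :: t) (by simpa using hc)]
theorem alnum_ne_underscore (c : Char) (h : PySem.Chars.isalnum c = true) : c ≠ '_' := by
  intro hc; subst hc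
  exact absurd h (by decide)

theorem fA_of_alnum (c : Char) (h : PySem.Chars.isalnum c = true) : fA c = c := by
  simp [fA, h]

theorem fA_of_nonalnum (c : Char) (h : PySem.Chars.isalnum c = false) : fA c = '_' := by
  simp [fA, h]

theorem squeeze_append_ne (r v : List Char) (h : ∀ c ∈ r, c ≠ '_') :
    squeeze (r ++ v) = r ++ squeeze v := by
  induction r with
  | nil => rfl
  | cons a r' ih =>
    simp only [List.cons_append]
    rw [squeeze_cons_head, if_neg (by rintro ⟨ha, _⟩; exact h a (by simp) ha),
      ih (fun c hc => h c (by simp [hc]))]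

theorem squeeze_eq_self_of_no_underscore (u : List Char) (h : ∀ c ∈ u, c ≠ '_') :
    squeeze u = u := by
  have := squeeze_append_ne u [] h
  simpa [squeeze] using this

theorem head?_ne_underscore_of_map_fA (w : List Char) (hw : ∀ a ∈ w.head?, PySem.Chars.isalnum a = true) :
    ∀ a ∈ (w.map fA).head?, a ≠ '_' := by
  cases w with
  | nil => simp
  | cons b t =>
    intro a ha
    simp only [List.map_cons, List.head?_cons, Option.mem_some_iff] at ha
    subst ha
    have hb := hw b rfl
    rw [fA_of_alnum b hb]
    exact alnum_ne_underscore b hb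

theorem squeeze_replicate_underscore (k : Nat) (v : List Char) (hk : 1 ≤ k)
    (hv : ∀ a ∈ v.head?, a ≠ '_') :
    squeeze (List.replicate k '_' ++ v) = '_' :: squeeze v := by
  induction k with
  | zero => omega
  | succ n ih =>
    cases n with
    | zero =>
      simp only [List.replicate_succ, List.replicate_zero, List.cons_append, List.nil_append]
      rw [squeeze_cons_head]
      cases v with
      | nil => simp [squeeze]
      | cons b t =>
        rw [if_neg (by rintro ⟨_, hb⟩; simp at hb; exact hv b rfl hb)]
    | succ m =>
      rw [List.replicate_succ, List.cons_append, squeeze_cons_head,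
        if_pos ⟨rfl, by simp [List.replicate_succ]⟩]
      exact ih (by omega)

-- the heart: on a list whose first and last characters are alphanumeric,
-- squeezing A's mapped chars gives B's '_'-joined runs
theorem squeeze_map_fA (n : Nat) : ∀ s : List Char, s.length ≤ n →
    (∀ a ∈ s.head?, PySem.Chars.isalnum a = true) →
    (∀ a ∈ s.getLast?, PySem.Chars.isalnum a = true) →
    squeeze (s.map fA) = PySem.Chars.join ['_'] (runs s) := by
  induction n with
  | zero =>
    intro s h _ _
    have : s = [] := List.eq_nil_of_length_eq_zero (Nat.le_zero.mp h)
    subst this; simp [squeeze, runs, PySem.Chars.join_nil]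
  | succ n ih =>
    intro s hlen hhead hlast
    cases hs : s with
    | nil => simp [squeeze, runs, PySem.Chars.join_nil]
    | cons c t =>
      subst hs
      have hc : PySem.Chars.isalnum c = true := hhead c rfl
      set r := List.takeWhile (fun c => PySem.Chars.isalnum c) (c :: t) with hr
      set rest := List.dropWhile (fun c => PySem.Chars.isalnum c) (c :: t) with hrest
      have hsplit : r ++ rest = c :: t := List.takeWhile_append_dropWhile
      have hrne : r ≠ [] := by
        rw [hr, List.takeWhile_cons_of_pos hc]; simp
      have hrall : ∀ a ∈ r, PySem.Chars.isalnum a = true := fun a ha => List.mem_takeWhile_imp ha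
      have hrne' : ∀ a ∈ r, a ≠ '_' := fun a ha => alnum_ne_underscore a (hrall a ha)
      have hmapr : r.map fA = r := by
        rw [List.map_congr_left (fun a ha => fA_of_alnum a (hrall a ha))]
        simp
      have hrestna : ∀ a ∈ rest.head?, PySem.Chars.isalnum a = false := by
        intro a ha
        have := List.head?_dropWhile_not (fun c => PySem.Chars.isalnum c) (c :: t)
        rw [← hrest] at this
        cases hh : rest.head? with
        | none => simp [hh] at ha
        | some b => rw [hh] at this ha; simp at ha; subst ha; exact this
      cases hrest2 : rest with
      | nil =>
        rw [← hsplit, hrest2, List.append_nil, hmapr,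
          squeeze_eq_self_of_no_underscore r hrne',
          runs_all_alnum r hrne hrall, PySem.Chars.join_singleton]
      | cons e rest' =>
        have he : PySem.Chars.isalnum e = false := by
          apply hrestna; rw [hrest2]; rfl
        set d := List.takeWhile naB rest with hd
        set w := List.dropWhile naB rest with hw
        have hsplit2 : d ++ w = rest := List.takeWhile_append_dropWhile
        have hdne : d ≠ [] := by
          rw [hd, hrest2]; simp [List.takeWhile, naB, he]
        have hdall : ∀ a ∈ d, PySem.Chars.isalnum a = false := by
          intro a ha
          have := List.mem_takeWhile_imp ha
          simpa [naB] using this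
        have hwhead : ∀ a ∈ w.head?, PySem.Chars.isalnum a = true := by
          intro a ha
          have := List.head?_dropWhile_not naB rest
          rw [← hw] at this
          cases hh : w.head? with
          | none => simp [hh] at ha
          | some b =>
            rw [hh] at this ha; simp at ha; subst ha
            simpa [naB] using this
        have hwne : w ≠ [] := by
          intro hwnil
          have : rest = d := by rw [← hsplit2, hwnil, List.append_nil]
          have hlast2 : rest.getLast? = (c :: t).getLast? := by
            rw [← hsplit]
            rw [List.getLast?_append_of_ne_nil]
            rw [hrest2]; simp
          have : (c :: t).getLast? = d.getLast? := by rw [← hlast2, this]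
          have hdl : d.getLast? = some (d.getLast hdne) := List.getLast?_eq_some_getLast hdne
          have halnum := hlast (d.getLast hdne) (by rw [this, hdl]; rfl)
          have := hdall (d.getLast hdne) (List.getLast_mem hdne)
          rw [halnum] at this; exact absurd this (by simp)
        have hwlast : ∀ a ∈ w.getLast?, PySem.Chars.isalnum a = true := by
          have e1 : (c :: t).getLast? = w.getLast? := by
            rw [← hsplit, ← hsplit2,
              List.getLast?_append_of_ne_nil _ (List.append_ne_nil_of_right_ne_nil d hwne),
              List.getLast?_append_of_ne_nil _ hwne]
          intro a ha
          exact hlast a (by rw [e1]; exact ha)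
        have hwlen : w.length ≤ n := by
          have h1 : r.length + rest.length = (c :: t).length := by
            rw [← hsplit, List.length_append]
          have h2 : d.length + w.length = rest.length := by
            rw [← hsplit2, List.length_append]
          have hr1 : 0 < r.length := List.length_pos_of_ne_nil hrne
          have hd1 : 0 < d.length := List.length_pos_of_ne_nil hdne
          simp only [List.length_cons] at h1 hlen
          omega
        have hmapd : d.map fA = List.replicate d.length '_' := by
          rw [List.map_congr_left (fun a ha => fA_of_nonalnum a (hdall a ha))]
          exact List.map_const' 
        -- rewrite s as r ++ d ++ w
        rw [← hsplit, ← hsplit2, List.map_append, List.map_append, hmapr, hmapd]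
        rw [← List.append_assoc, List.append_assoc r, squeeze_append_ne _ _ hrne',
          squeeze_replicate_underscore d.length (w.map fA)
            (List.length_pos_of_ne_nil hdne) (head?_ne_underscore_of_map_fA w hwhead),
          ih w hwlen hwhead hwlast]
        rw [runs_append_alnum_run r (d ++ w) hrne hrall
            (Or.inr (by
              intro a ha
              rw [List.head?_append_of_ne_nil _ hdne] at ha
              exact hdall a (List.mem_of_mem_head? ha))),
          runs_nonalnum_prefix d w hdall]
        have hrw : runs w ≠ [] := by
          cases hww : w with
          | nil => exact absurd hww hwne
          | cons b t' =>
            exact runs_cons_alnum_ne_nil b t' (by apply hwhead; rw [hww]; rfl)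
        cases hrw2 : runs w with
        | nil => exact absurd hrw2 hrw
        | cons q qs =>
          rw [PySem.Chars.join_cons_cons]
          simp
def coreT (s : List Char) : List Char :=
  (((s.dropWhile naB).reverse.dropWhile naB).reverse)

theorem contains_fA (c : Char) : ['_'].contains (fA c) = naB c := by
  by_cases h : PySem.Chars.isalnum c = true
  · rw [fA_of_alnum c h]
    have hne := alnum_ne_underscore c h
    simp [naB, h]
    exact fun hc => absurd hc.symm (Ne.symm hne)
  · rw [fA_of_nonalnum c (by simpa using h)]
    simp [naB, h]

theorem mapped_eq (s : List Char) :
    PySem.Chars.join [] (s.map (fun c => if PySem.Chars.isalnum c then [c] else ['_'])) = s.map fA := by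
  have : (fun c => if PySem.Chars.isalnum c then [c] else ['_']) = (fun c => [fA c]) := by
    funext c; by_cases h : PySem.Chars.isalnum c <;> simp [fA, h]
  rw [this, show (fun c => [fA c]) = ((fun c => [c]) ∘ fA) from rfl, ← List.map_map]
  exact PySem.Chars.join_nil_singletons _

theorem dropWhile_map_fA (u : List Char) :
    List.dropWhile (fun c => ['_'].contains c) (u.map fA) = (u.dropWhile naB).map fA := by
  rw [List.dropWhile_map]
  have : ((fun c => ['_'].contains c) ∘ fA) = naB := funext contains_fA
  rw [this]

theorem strip_mapped (s : List Char) :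
    PySem.Chars.stripChars (s.map fA) ['_'] = (coreT s).map fA := by
  show (List.dropWhile _ (List.dropWhile _ (s.map fA)).reverse).reverse = _
  rw [dropWhile_map_fA, ← List.map_reverse, dropWhile_map_fA, ← List.map_reverse]
  rfl

theorem coreT_head (s : List Char) : ∀ a ∈ (coreT s).head?, PySem.Chars.isalnum a = true := by
  intro a ha
  unfold coreT at ha
  rw [List.head?_reverse] at ha
  have hsub : List.dropWhile naB (s.dropWhile naB).reverse <:+ (s.dropWhile naB).reverse :=
    List.dropWhile_suffix _
  obtain ⟨pre, hpre⟩ := hsub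
  cases hd : List.dropWhile naB (s.dropWhile naB).reverse with
  | nil => simp [hd] at ha
  | cons x xs =>
    rw [hd] at ha hpre
    have e : ((s.dropWhile naB).reverse).getLast? = (x :: xs).getLast? := by
      rw [← hpre, List.getLast?_append_of_ne_nil _ (by simp)]
    rw [List.getLast?_reverse] at e
    rw [← e] at ha
    cases hh : (s.dropWhile naB).head? with
    | none => simp [hh] at ha
    | some b =>
      rw [hh] at ha; simp at ha; subst ha
      have := List.head?_dropWhile_not naB s
      rw [hh] at this
      simpa [naB] using this

theorem coreT_last (s : List Char) : ∀ a ∈ (coreT s).getLast?, PySem.Chars.isalnum a = true := by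
  intro a ha
  unfold coreT at ha
  rw [List.getLast?_reverse] at ha
  have := List.head?_dropWhile_not naB (s.dropWhile naB).reverse
  cases hh : (List.dropWhile naB (s.dropWhile naB).reverse).head? with
  | none => simp [hh] at ha
  | some b =>
    rw [hh] at this ha; simp at ha; subst ha
    simpa [naB] using this

theorem runs_coreT (s : List Char) : runs (coreT s) = runs s := by
  have h1 : runs (s.dropWhile naB) = runs s := runs_dropWhile s
  rw [← h1]
  set s1 := s.dropWhile naB with hs1
  have hdec : s1.reverse = List.takeWhile naB s1.reverse ++ List.dropWhile naB s1.reverse :=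
    (List.takeWhile_append_dropWhile).symm
  have : s1 = (List.dropWhile naB s1.reverse).reverse ++ (List.takeWhile naB s1.reverse).reverse := by
    conv_lhs => rw [← List.reverse_reverse s1, hdec]
    rw [List.reverse_append]
  conv_rhs => rw [this]
  unfold coreT
  rw [← hs1]
  rw [runs_append_nonalnum]
  intro c hc
  rw [List.mem_reverse] at hc
  have := List.mem_takeWhile_imp hc
  simpa [naB] using this
def stepB (acc : List (List Char) × List Char) (ch : Char) : List (List Char) × List Char :=
  if PySem.Chars.isalnum ch then (acc.1, acc.2 ++ [ch])
  else (if acc.2 ≠ [] then acc.1 ++ [acc.2] else acc.1, [])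

def finB (st : List (List Char) × List Char) : List (List Char) :=
  if st.2 ≠ [] then st.1 ++ [st.2] else st.1

theorem foldl_runsP (s : List Char) : ∀ (W : List (List Char)) (cur : List Char),
    finB (s.foldl stepB (W, cur)) = W ++ runsP cur s := by
  induction s with
  | nil =>
    intro W cur
    simp only [List.foldl_nil, runsP, finB]
    by_cases h : cur = []
    · subst h; simp
    · simp [h]
  | cons c t ih =>
    intro W cur
    simp only [List.foldl_cons]
    by_cases hc : PySem.Chars.isalnum c = true
    · rw [show stepB (W, cur) c = (W, cur ++ [c]) by simp [stepB, hc]]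
      rw [ih W (cur ++ [c]), runsP, if_pos hc]
    · by_cases hcur : cur = []
      · subst hcur
        rw [show stepB (W, []) c = (W, []) by simp [stepB, hc]]
        rw [ih W [], runsP, if_neg (by simp [hc]), if_pos rfl]
      · rw [show stepB (W, cur) c = (W ++ [cur], []) by simp [stepB, hc, hcur]]
        rw [ih (W ++ [cur]) [], runsP, if_neg (by simp [hc]), if_neg hcur, List.append_assoc]
        rfl

theorem runsP_runs (s : List Char) : ∀ cur : List Char,
    (∀ c ∈ cur, PySem.Chars.isalnum c = true) → runsP cur s = runs (cur ++ s) := by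
  induction s with
  | nil =>
    intro cur hall
    rw [runsP, List.append_nil]
    by_cases h : cur = []
    · subst h; simp [runs]
    · rw [if_neg h, runs_all_alnum cur h hall]
  | cons c t ih =>
    intro cur hall
    by_cases hc : PySem.Chars.isalnum c = true
    · rw [runsP, if_pos hc, ih (cur ++ [c]) (by
        intro a ha
        rcases List.mem_append.mp ha with h' | h'
        · exact hall a h'
        · simp at h'; subst h'; exact hc)]
      rw [List.append_assoc]
      rfl
    · rw [runsP, if_neg (by simp [hc])]
      by_cases hcur : cur = []
      · subst hcur
        rw [if_pos rfl, ih [] (by simp), List.nil_append, List.nil_append,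
          runs_cons_nonalnum c t (by simpa using hc)]
      · rw [if_neg hcur, ih [] (by simp), List.nil_append]
        rw [runs_append_alnum_run cur (c :: t) hcur hall
          (Or.inr (by intro a ha; simp at ha; subst ha; simpa using hc)),
          runs_cons_nonalnum c t (by simpa using hc)]

theorem slug_eq (s : List Char) :
    collapseA (PySem.Chars.stripChars (PySem.Chars.join []
        (s.map (fun c => if PySem.Chars.isalnum c then [c] else ['_']))) ['_']).length
      (PySem.Chars.stripChars (PySem.Chars.join []
        (s.map (fun c => if PySem.Chars.isalnum c then [c] else ['_']))) ['_'])
    = PySem.Chars.join ['_'] (finB (s.foldl stepB ([], []))) := by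
  rw [foldl_runsP s [] [], runsP_runs s [] (by simp), List.nil_append, List.nil_append]
  rw [mapped_eq, strip_mapped, collapseA_eq_squeeze _ _ le_rfl,
    squeeze_map_fA (coreT s).length (coreT s) le_rfl (coreT_head s) (coreT_last s),
    runs_coreT]

-- ===== VERDICT (by name: the statement is the Claim_ definition above) =====
theorem task_id_spec : Claim_equal_task_id := by
  intro pair _ _
  unfold Spec_task_id
  simp only [task_id, task_id_alt]
  rw [slug_eq]
  rfl
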